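-- pv_equiv track=rewrite | github.com/Riteshyadav025/Python-Lab- | 23-02-2026 To 01- 03 -2026/combinatorics_frequency_counting.py | count_unique_vowel_strings
-- ===== SOURCE A (Python) =====
-- from math import factorial
--
-- def count_unique_vowel_strings(s):
--     vowels = "aeiou"
--
--     freq = {}
--     for ch in s:
--         if ch in vowels:
--             freq[ch] = freq.get(ch, 0) + 1
--
--     if not freq:
--         return 0
--
--     selection_ways = 1
--     for count in freq.values():
--         selection_ways *= count
--
--     k = len(freq)
--     permutation_ways = factorial(k)
--
--     return selection_ways * permutation_ways
-- ===== SOURCE B (Python) =====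
-- from math import factorial
--
-- def count_unique_vowel_strings(s):
--     # Sort the vowels of s, then a single run-length scan over the sorted list:
--     # each run of equal vowels contributes its length to the selection product,
--     # and the number of runs is the number of distinct vowels.
--     vs = sorted(ch for ch in s if ch in "aeiou")
--     if not vs:
--         return 0
--     prev = vs[0]
--     run = 1
--     ways = 1
--     k = 1
--     for ch in vs[1:]:
--         if ch == prev:
--             run += 1
--         else:
--             ways *= run
--             k += 1
--             run = 1
--             prev = ch
--     ways *= run
--     return ways * factorial(k)
-- ===== Notes on version B (the rewrite author's own statement) =====
-- stated objective: alternative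
-- what changed: Replaces A's frequency-dict pass and dict-values product with sort-then-scan: filter the vowels of s, sort them, and do one run-length scan over the sorted list, multiplying each run length into the selection product and counting runs as the distinct-vowel count.
import Mathlib
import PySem

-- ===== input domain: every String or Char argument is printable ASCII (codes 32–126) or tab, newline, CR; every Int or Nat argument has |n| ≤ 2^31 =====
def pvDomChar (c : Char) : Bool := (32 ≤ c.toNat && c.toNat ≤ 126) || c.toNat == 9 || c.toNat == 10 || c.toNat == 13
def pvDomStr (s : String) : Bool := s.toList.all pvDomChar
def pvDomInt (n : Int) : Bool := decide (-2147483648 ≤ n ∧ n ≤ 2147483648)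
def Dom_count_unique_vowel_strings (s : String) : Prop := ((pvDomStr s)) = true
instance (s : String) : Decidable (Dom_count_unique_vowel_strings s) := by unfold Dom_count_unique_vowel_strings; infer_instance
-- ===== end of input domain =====

-- ===== PORT A =====
-- B replaces A's frequency-dict pass with sort-then-run-length-scan over the filtered vowels (alternative algorithm, not claimed faster).
-- Note: Python's `ch in vowels` tests a one-character string's membership in "aeiou";
-- since ch is always a single character of s, it is ported as character-list membership (exact).
def count_unique_vowel_strings (s : String) : Int :=
  let vowels : List Char := "aeiou".toList
  let freq : PySem.Dict Char Int :=
    s.toList.foldl (fun d ch => if vowels.contains ch then d.insert ch (d.getD ch 0 + 1) else d)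
      PySem.Dict.empty
  if freq.size = 0 then 0
  else
    let selection_ways := freq.values.foldl (fun acc c => acc * c) 1
    let k := freq.size
    let permutation_ways : Int := (Nat.factorial k : Int)
    selection_ways * permutation_ways

-- ===== PORT B =====
-- state = (prev, run, ways, k), exactly B's four loop variables; the loop runs over vs[1:]
def pvScanStep (st : Char × Int × Int × Int) (ch : Char) : Char × Int × Int × Int :=
  if ch = st.1 then (st.1, st.2.1 + 1, st.2.2.1, st.2.2.2)
  else (ch, 1, st.2.2.1 * st.2.1, st.2.2.2 + 1)

def count_unique_vowel_strings_alt (s : String) : Int :=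
  let vowels : List Char := "aeiou".toList
  let vs := PySem.List.sorted (s.toList.filter (fun ch => vowels.contains ch)) (fun x => x) false
  match vs with
  | [] => 0
  | h :: t =>
    let st := t.foldl pvScanStep (h, 1, 1, 1)
    (st.2.2.1 * st.2.1) * (Nat.factorial st.2.2.2.toNat : Int)

-- ===== PRECONDITION & SPEC =====
def Spec_count_unique_vowel_strings (s : String) (out : Int) : Prop := out = count_unique_vowel_strings_alt s
instance (s : String) (out : Int) : Decidable (Spec_count_unique_vowel_strings s out) := by unfold Spec_count_unique_vowel_strings; infer_instance

-- ===== CLAIM (what is proved, stated in full; the proofs are below) =====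
def Claim_equal_count_unique_vowel_strings : Prop := ∀ (s : String), Dom_count_unique_vowel_strings s → Spec_count_unique_vowel_strings s (count_unique_vowel_strings s)

-- ===== LEMMAS AND PROOFS =====

-- the canonical sorted form of a vowel list: one replicate block per vowel of the alphabet
def pvBlocks (cnt : Char → Nat) : List Char :=
  ("aeiou".toList).flatMap (fun v => List.replicate (cnt v) v)

-- a list drawn from a duplicate-free alphabet is a permutation of its block decomposition
lemma perm_blocks : ∀ (vs l : List Char), vs.Nodup → (∀ x ∈ l, x ∈ vs) →
    (vs.flatMap (fun v => List.replicate (l.count v) v)).Perm l := by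
  intro vs
  induction vs with
  | nil =>
    intro l _ hsub
    have : l = [] := List.eq_nil_iff_forall_not_mem.mpr (fun x hx => by simpa using hsub x hx)
    simp [this]
  | cons v rest ih =>
    intro l hnd hsub
    have hnr : rest.Nodup := hnd.of_cons
    have hvr : v ∉ rest := by simpa using (List.nodup_cons.mp hnd).1
    have hcongr : rest.flatMap (fun u => List.replicate (l.count u) u)
        = rest.flatMap (fun u => List.replicate ((l.filter (fun x => !(x == v))).count u) u) := by
      apply List.flatMap_congr
      intro u hu
      have huv : u ≠ v := fun h => hvr (h ▸ hu)
      simp [List.count_filter, huv]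
    have hih : (rest.flatMap (fun u => List.replicate ((l.filter (fun x => !(x == v))).count u) u)).Perm
        (l.filter (fun x => !(x == v))) := by
      apply ih _ hnr
      intro x hx
      rcases List.mem_filter.mp hx with ⟨hxl, hxv⟩
      rcases List.mem_cons.mp (hsub x hxl) with h | h
      · simp only [h, Bool.not_eq_true'] at hxv; simp at hxv
      · exact h
    have heq : ((v :: rest).flatMap (fun u => List.replicate (l.count u) u))
        = l.filter (· == v) ++ rest.flatMap (fun u => List.replicate ((l.filter (fun x => !(x == v))).count u) u) := by
      rw [List.flatMap_cons, ← List.filter_beq, hcongr]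
    rw [heq]
    exact (List.Perm.append_left _ hih).trans (List.filter_append_perm _ l)

lemma blocks_pairwise_gen : ∀ (vs : List Char), vs.Pairwise (fun a b => a ≤ b) →
    ∀ cnt : Char → Nat, (vs.flatMap (fun v => List.replicate (cnt v) v)).Pairwise (fun a b => a ≤ b) := by
  intro vs
  induction vs with
  | nil => intro _ cnt; simp
  | cons v rest ih =>
    intro hp cnt
    rw [List.flatMap_cons]
    refine List.pairwise_append.mpr ⟨?_, ih hp.of_cons cnt, ?_⟩
    · exact List.pairwise_replicate.mpr (Or.inr le_rfl)
    · intro a ha b hb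
      rcases List.eq_of_mem_replicate ha with rfl
      rcases List.mem_flatMap.mp hb with ⟨u, hu, hbu⟩
      rw [List.eq_of_mem_replicate hbu]
      exact (List.pairwise_cons.mp hp).1 u hu

lemma blocks_pairwise (cnt : Char → Nat) : (pvBlocks cnt).Pairwise (fun a b => a ≤ b) := by
  unfold pvBlocks
  exact blocks_pairwise_gen _ (by decide) cnt

-- run of the same character: run counter increments, nothing else changes
lemma scan_replicate (v : Char) : ∀ (n : Nat) (run ways k : Int),
    (List.replicate n v).foldl pvScanStep (v, run, ways, k) = (v, run + n, ways, k) := by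
  intro n
  induction n with
  | zero => intro run ways k; simp
  | succ m ih =>
    intro run ways k
    rw [List.replicate_succ, List.foldl_cons]
    show List.foldl pvScanStep (pvScanStep (v, run, ways, k) v) _ = _
    have hstep : pvScanStep (v, run, ways, k) v = (v, run + 1, ways, k) := by
      simp [pvScanStep]
    rw [hstep, ih]
    congr 2
    push_cast
    ring

-- the scan over a block decomposition: final ways*run is the product of the nonzero
-- counts and final k is the number of nonzero counts
lemma scan_blocks : ∀ (vs : List Char) (cnt : Char → Nat) (prev : Char) (run ways k : Int),
    vs.Nodup → prev ∉ vs →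
    ((vs.flatMap (fun v => List.replicate (cnt v) v)).foldl pvScanStep (prev, run, ways, k)).2.2.1
        * ((vs.flatMap (fun v => List.replicate (cnt v) v)).foldl pvScanStep (prev, run, ways, k)).2.1
      = ways * run * ((vs.filter (fun v => cnt v ≠ 0)).map (fun v => (cnt v : Int))).prod
    ∧ ((vs.flatMap (fun v => List.replicate (cnt v) v)).foldl pvScanStep (prev, run, ways, k)).2.2.2
      = k + ((vs.filter (fun v => cnt v ≠ 0)).length : Int) := by
  intro vs
  induction vs with
  | nil => intro cnt prev run ways k _ _; simp
  | cons v rest ih =>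
    intro cnt prev run ways k hnd hpv
    have hnr : rest.Nodup := hnd.of_cons
    have hvr : v ∉ rest := by simpa using (List.nodup_cons.mp hnd).1
    have hpr : prev ∉ rest := fun h => hpv (List.mem_cons_of_mem _ h)
    have hpvne : v ≠ prev := fun h => hpv (h ▸ List.mem_cons_self)
    rw [List.flatMap_cons, List.foldl_append]
    cases hc : cnt v with
    | zero =>
      have hfil : (v :: rest).filter (fun u => decide (cnt u ≠ 0))
          = rest.filter (fun u => decide (cnt u ≠ 0)) := by
        rw [List.filter_cons_of_neg]; simp [hc]
      rw [hfil]
      simpa using ih cnt prev run ways k hnr hpr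
    | succ m =>
      have hstep : pvScanStep (prev, run, ways, k) v = (v, 1, ways * run, k + 1) := by
        simp [pvScanStep, hpvne]
      rw [List.replicate_succ, List.foldl_cons, hstep, scan_replicate]
      have hfil : (v :: rest).filter (fun u => decide (cnt u ≠ 0))
          = v :: rest.filter (fun u => decide (cnt u ≠ 0)) := by
        rw [List.filter_cons_of_pos]; simp [hc]
      rw [hfil]
      rcases ih cnt v (1 + (m : Int)) (ways * run) (k + 1) hnr hvr with ⟨h1, h2⟩
      constructor
      · rw [h1, List.map_cons, List.prod_cons, hc]
        push_cast
        ring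
      · rw [h2, List.length_cons]
        push_cast
        ring

-- ===== VERDICT (by name: the statement is the Claim_ definition above) =====
theorem count_unique_vowel_strings_spec : Claim_equal_count_unique_vowel_strings := by
  intro s _
  show count_unique_vowel_strings s = count_unique_vowel_strings_alt s
  unfold count_unique_vowel_strings count_unique_vowel_strings_alt
  dsimp only
  set vlist := s.toList.filter (fun ch => ("aeiou".toList).contains ch) with hvl
  have hA : s.toList.foldl
      (fun (d : PySem.Dict Char Int) ch =>
        if ("aeiou".toList).contains ch then d.insert ch (d.getD ch 0 + 1) else d)
      PySem.Dict.empty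
      = PySem.Dict.counter vlist := by
    rw [← PySem.Dict.foldl_insert_getD_add_one_eq_counter, hvl, List.foldl_filter]
  rw [hA]
  set S := PySem.Set.ofList vlist with hS
  have hvals : (PySem.Dict.counter vlist).values = S.map (fun k => (vlist.count k : Int)) := by
    show ((PySem.Dict.counter vlist).items).map (·.2) = _
    rw [PySem.Dict.items_counter]
    simp [List.map_map]
    rfl
  have hsize : (PySem.Dict.counter vlist).size = S.length := by
    show ((PySem.Dict.counter vlist).items).length = _
    rw [PySem.Dict.items_counter]
    simp
    rfl
  set cnt : Char → Nat := fun v => vlist.count v with hcnt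
  set F := ("aeiou".toList).filter (fun v => decide (cnt v ≠ 0)) with hF
  have hSnd : S.Nodup := PySem.Set.nodup_ofList vlist
  have hFnd : F.Nodup := (by decide : ("aeiou".toList).Nodup).filter _
  have hmem : ∀ x, x ∈ S ↔ x ∈ F := by
    intro x
    rw [hS, hF, PySem.Set.mem_ofList, hvl]
    simp only [List.mem_filter, List.contains_iff_mem, decide_not, Bool.not_eq_true',
      decide_eq_false_iff_not]
    constructor
    · rintro ⟨hx, hv⟩
      refine ⟨hv, ?_⟩
      have : 0 < vlist.count x := List.count_pos_iff.mpr (by rw [hvl]; exact List.mem_filter.mpr ⟨hx, by simpa [List.contains_iff_mem] using hv⟩)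
      simp only [hcnt]
      omega
    · rintro ⟨hv, hc⟩
      have hx : x ∈ vlist := List.count_pos_iff.mp (by simp only [hcnt] at hc; omega)
      rw [hvl] at hx
      exact ⟨(List.mem_filter.mp hx).1, hv⟩
  have hperm : S.Perm F := (List.perm_ext_iff_of_nodup hSnd hFnd).mpr hmem
  -- the sorted vowel list is exactly the block decomposition
  have hsub : ∀ x ∈ vlist, x ∈ "aeiou".toList := by
    intro x hx
    rw [hvl] at hx
    simpa [List.contains_iff_mem] using (List.mem_filter.mp hx).2
  have hblocks : PySem.List.sorted vlist (fun x => x) false = pvBlocks cnt := by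
    apply PySem.List.eq_of_perm_of_pairwise_le_of_injective (fun x => x) (fun a b h => h)
    · exact (PySem.List.sorted_perm vlist (fun x => x) false).trans
        (perm_blocks ("aeiou".toList) vlist (by decide) hsub).symm
    · exact PySem.List.sorted_pairwise vlist (fun x => x)
    · exact blocks_pairwise cnt
  rw [hblocks]
  cases hvs : pvBlocks cnt with
  | nil =>
    have hvnil : vlist = [] := by
      have := (perm_blocks ("aeiou".toList) vlist (by decide) hsub)
      rw [show (("aeiou".toList).flatMap (fun v => List.replicate (vlist.count v) v)) = pvBlocks cnt from rfl, hvs] at this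
      exact this.symm.eq_nil
    have : S = [] := by rw [hS, hvnil]; rfl
    rw [hsize, this]
    simp
  | cons h t =>
    have hvne : vlist ≠ [] := by
      intro hnil
      have : pvBlocks cnt = [] := by
        unfold pvBlocks
        apply List.flatMap_eq_nil_iff.mpr
        intro v _
        simp [hcnt, hnil]
      rw [hvs] at this
      exact List.cons_ne_nil _ _ this
    have hSne : S ≠ [] := by
      rw [hS]
      intro hnil
      rcases List.exists_mem_of_ne_nil vlist hvne with ⟨x, hx⟩
      have := (PySem.Set.mem_ofList vlist x).mpr hx
      rw [hnil] at this
      simp at this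
    have hsz : (PySem.Dict.counter vlist).size ≠ 0 := by
      rw [hsize]
      simpa [List.length_eq_zero_iff] using hSne
    rw [if_neg hsz]
    dsimp only
    -- fold over t from (h,1,1,1) = fold over h::t from a pre-state with a non-vowel prev
    have hh : h ∈ "aeiou".toList := by
      have : h ∈ pvBlocks cnt := by rw [hvs]; exact List.mem_cons_self
      unfold pvBlocks at this
      rcases List.mem_flatMap.mp this with ⟨u, hu, hru⟩
      rw [List.eq_of_mem_replicate hru]
      exact hu
    have hhz : h ≠ 'z' := by
      intro hz
      rw [hz] at hh
      exact absurd hh (by decide)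
    have hpre : pvScanStep ('z', 1, 1, 0) h = (h, 1, 1, 1) := by
      simp [pvScanStep, hhz]
    have hfold : t.foldl pvScanStep (h, 1, 1, 1) = (pvBlocks cnt).foldl pvScanStep ('z', 1, 1, 0) := by
      rw [hvs, List.foldl_cons, hpre]
    rcases scan_blocks ("aeiou".toList) cnt 'z' 1 1 0 (by decide) (by decide) with ⟨h1, h2⟩
    rw [show (("aeiou".toList).flatMap (fun v => List.replicate (cnt v) v)) = pvBlocks cnt from rfl] at h1 h2
    rw [hfold]
    rw [hvals, hsize]
    have hprod : (S.map (fun k => (vlist.count k : Int))).foldl (fun acc c => acc * c) 1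
        = (F.map (fun v => (cnt v : Int))).prod := by
      rw [← List.prod_eq_foldl]
      exact (hperm.map _).prod_eq
    rw [← hF] at h1 h2
    rw [hprod, h1, h2]
    have hlen : S.length = F.length := hperm.length_eq
    rw [hlen]
    have hto : ((0 : Int) + (F.length : Int)).toNat = F.length := by omega
    rw [hto]
    ring
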